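-- pv_equiv track=rewrite | github.com/elmarc0/Shift-and | main.py | bit
-- ===== SOURCE A (Python) =====
-- def bit(ocorrencias, recorrencias):#aqui pegamos o ocorrencias do caracter, quais posições ele ocupa, na string atual, e quis posições ele ocupa no dicionario
--   cont =len(recorrencias) -1
--   resultado = []
--   encontrada = 0
--   if ocorrencias[cont] and recorrencias[cont]:#checamos se o ultimo caracter tambem tem como popsição o ultimo no dicionario
--     encontrada = 1 #numero de palavras encontradas após checagem do ultimo bit
--     ocorrencias[cont] = False
--   cont -= 1 #como já checamos o ultimo decrementamos
--   while cont >= 0: #começamos e ordem decrecente para podemos alterar os valores do indice da frente, se não ele seria zerado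
--     if ocorrencias[cont] and recorrencias[cont]:
--       ocorrencias[cont+1] = True #caso o caracter esteja batendo com suas posições no dicionario, então increntamos a proxima posição
--     ocorrencias[cont] = False
--     cont -=1
--      #decrementamos pois esta posição já passou por analise
--   resultado.append(encontrada)
--   resultado.append(ocorrencias)
--   return resultado #essa lista retorna uma lista atualizada de valores boleanos após a checagem e o numero de palavras encontradas
-- ===== SOURCE B (Python) =====
-- def bit(ocorrencias, recorrencias):
--     # Snapshot the old state, then rebuild it with a single forward shift:
--     # position i becomes old[i-1] and recorrencias[i-1], position 0 becomes False.
--     n = len(recorrencias)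
--     old = ocorrencias[:n]
--     encontrada = 1 if (old[n - 1] and recorrencias[n - 1]) else 0
--     ocorrencias[0] = False
--     for i in range(1, n):
--         ocorrencias[i] = old[i - 1] and recorrencias[i - 1]
--     return [encontrada, ocorrencias]
-- ===== Notes on version B (the rewrite author's own statement) =====
-- stated objective: simpler
-- what changed: B snapshots the old occurrence vector once and rebuilds the state with one forward shift (new[i] = old[i-1] and rec[i-1], new[0] = False) instead of A's backward in-place sweep with conditional writes to the next slot.
-- intended difference: When the last occurrence bit is set but the pattern's last bit is not (and the bit shifted into the last slot would be clear), A keeps the stale True in the last position because it only clears it on a match, while B shifts it out like every other position, which is the correct shift-and state update. — e.g. on bit([true], [false]): A returns (0, [true]), B returns (0, [false])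
-- outside the precondition, e.g. on bit([False], []): A returns (0, [False]), B raises IndexError
import Mathlib
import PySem

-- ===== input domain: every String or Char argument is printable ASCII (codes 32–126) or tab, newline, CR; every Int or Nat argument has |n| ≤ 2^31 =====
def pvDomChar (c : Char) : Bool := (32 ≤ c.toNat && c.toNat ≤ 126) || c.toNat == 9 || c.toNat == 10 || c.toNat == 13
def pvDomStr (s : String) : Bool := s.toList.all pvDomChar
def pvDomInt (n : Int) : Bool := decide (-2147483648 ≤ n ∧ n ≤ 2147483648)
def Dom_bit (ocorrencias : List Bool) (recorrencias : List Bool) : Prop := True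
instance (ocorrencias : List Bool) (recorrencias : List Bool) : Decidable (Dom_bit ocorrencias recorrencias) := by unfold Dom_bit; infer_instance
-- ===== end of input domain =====

-- B replaces A's backward in-place sweep by a snapshot plus one forward shift (simpler); both
-- Pythons mutate `ocorrencias` in place — the theorems are about the RETURN value, and inside
-- D_bit the two returned (and final in-place) list contents intentionally differ.

-- ===== PORT A =====
-- Body of one iteration of A's while-loop at index c: conditionally set slot c+1 to True, then
-- clear slot c.  getD/set are exact for the in-range indices Pre_bit guarantees.
def bitStep (recorrencias : List Bool) (oc : List Bool) (c : Nat) : List Bool :=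
  (if oc.getD c false && recorrencias.getD c false then oc.set (c+1) true else oc).set c false

-- A's `while cont >= 0:` loop, run at indices c, c-1, …, 0.
def bitLoopA (recorrencias : List Bool) : List Bool → Nat → List Bool
  | oc, 0 => bitStep recorrencias oc 0
  | oc, c + 1 => bitLoopA recorrencias (bitStep recorrencias oc (c+1)) c

def bit (ocorrencias : List Bool) (recorrencias : List Bool) : Int × List Bool :=
  let n := recorrencias.length
  let hit := ocorrencias.getD (n-1) false && recorrencias.getD (n-1) false
  let encontrada : Int := if hit then 1 else 0
  let oc1 := if hit then ocorrencias.set (n-1) false else ocorrencias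
  -- the while loop starts at cont = n-2 and runs exactly when 2 ≤ n (Pre_bit gives 1 ≤ n)
  let oc2 := if 2 ≤ n then bitLoopA recorrencias oc1 (n-2) else oc1
  (encontrada, oc2)

-- ===== PORT B =====
def bit_alt (ocorrencias : List Bool) (recorrencias : List Bool) : Int × List Bool :=
  let n := recorrencias.length
  let old := PySem.List.slice ocorrencias none (some (n : Int))   -- old = ocorrencias[:n]
  let encontrada : Int := if old.getD (n-1) false && recorrencias.getD (n-1) false then 1 else 0
  let oc0 := ocorrencias.set 0 false                              -- ocorrencias[0] = False
  -- for i in range(1, n): ocorrencias[i] = old[i-1] and recorrencias[i-1]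
  let oc' := (List.range' 1 (n-1)).foldl
      (fun acc i => acc.set i (old.getD (i-1) false && recorrencias.getD (i-1) false)) oc0
  (encontrada, oc')

-- ===== PRECONDITION & SPEC =====
-- Pre_bit excludes the inputs where A raises IndexError (ocorrencias shorter than recorrencias,
-- or recorrencias empty with ocorrencias's last element True) together with the remaining
-- recorrencias = [] inputs, on which A returns only through a negative-index wraparound
-- (ocorrencias[-1]) and B raises IndexError (see claim.json "cites").
def Pre_bit (ocorrencias : List Bool) (recorrencias : List Bool) : Prop :=
  recorrencias ≠ [] ∧ recorrencias.length ≤ ocorrencias.length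
instance (ocorrencias : List Bool) (recorrencias : List Bool) : Decidable (Pre_bit ocorrencias recorrencias) := by unfold Pre_bit; infer_instance
def pvWitness_bit : List Bool × List Bool := ([true, false], [true])

-- On inputs whose last occurrence bit is True while the pattern's last bit is False (and the bit
-- shifted into the last slot would be clear), A returns a state keeping that stale True — it only
-- clears the last slot on a match — while B shifts it out like every other position, which is the
-- intended shift-and state update.
def D_bit (ocorrencias : List Bool) (recorrencias : List Bool) : Prop :=
  1 ≤ recorrencias.length ∧ recorrencias.length ≤ ocorrencias.length ∧
  ocorrencias.getD (recorrencias.length - 1) false = true ∧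
  recorrencias.getD (recorrencias.length - 1) false = false ∧
  (recorrencias.length = 1 ∨
    (ocorrencias.getD (recorrencias.length - 2) false && recorrencias.getD (recorrencias.length - 2) false) = false)
instance (ocorrencias : List Bool) (recorrencias : List Bool) : Decidable (D_bit ocorrencias recorrencias) := by unfold D_bit; infer_instance

def Spec_bit (ocorrencias : List Bool) (recorrencias : List Bool) (out : Int × List Bool) : Prop := ¬ D_bit ocorrencias recorrencias → out = bit_alt ocorrencias recorrencias
instance (ocorrencias : List Bool) (recorrencias : List Bool) (out : Int × List Bool) : Decidable (Spec_bit ocorrencias recorrencias out) := by unfold Spec_bit; infer_instance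

def pvDiffWitness_bit : List Bool × List Bool := ([true], [false])
def pvDiffWitnessOut_bit : (Int × List Bool) × (Int × List Bool) := ((0, [true]), (0, [false]))

-- ===== CLAIM (what is proved, stated in full; the proofs are below) =====
def Claim_unchanged_bit : Prop := ∀ (ocorrencias : List Bool) (recorrencias : List Bool), Dom_bit ocorrencias recorrencias → Pre_bit ocorrencias recorrencias → Spec_bit ocorrencias recorrencias (bit ocorrencias recorrencias)
def Claim_changed_bit : Prop := Dom_bit (pvDiffWitness_bit.1) (pvDiffWitness_bit.2) ∧ Pre_bit (pvDiffWitness_bit.1) (pvDiffWitness_bit.2) ∧ D_bit (pvDiffWitness_bit.1) (pvDiffWitness_bit.2) ∧ bit (pvDiffWitness_bit.1) (pvDiffWitness_bit.2) = pvDiffWitnessOut_bit.1 ∧ bit_alt (pvDiffWitness_bit.1) (pvDiffWitness_bit.2) = pvDiffWitnessOut_bit.2 ∧ pvDiffWitnessOut_bit.1 ≠ pvDiffWitnessOut_bit.2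
def Claim_exact_bit : Prop := ∀ (ocorrencias : List Bool) (recorrencias : List Bool), Dom_bit ocorrencias recorrencias → Pre_bit ocorrencias recorrencias → D_bit ocorrencias recorrencias → bit ocorrencias recorrencias ≠ bit_alt ocorrencias recorrencias

-- ===== LEMMAS AND PROOFS =====

theorem getD_set_self (xs : List Bool) (i : Nat) (b : Bool) (h : i < xs.length) :
    (xs.set i b).getD i false = b := by
  simp [List.getD_eq_getElem?_getD, h]

theorem getD_set_ne (xs : List Bool) (b : Bool) {i j : Nat} (h : i ≠ j) :
    (xs.set i b).getD j false = xs.getD j false := by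
  simp [List.getD_eq_getElem?_getD, h]

theorem getD_take (oc : List Bool) (n j : Nat) (h : j < n) :
    (oc.take n).getD j false = oc.getD j false := by
  simp [List.getD_eq_getElem?_getD, h]

theorem length_bitStep (recorrencias oc : List Bool) (c : Nat) :
    (bitStep recorrencias oc c).length = oc.length := by
  unfold bitStep; split <;> simp

theorem bitStep_getD (recorrencias oc : List Bool) (c : Nat) (h : c + 1 < oc.length) (k : Nat) :
    (bitStep recorrencias oc c).getD k false =
      if k = c then false
      else if k = c + 1 then (oc.getD c false && recorrencias.getD c false) || oc.getD (c+1) false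
      else oc.getD k false := by
  unfold bitStep
  have hl : (if oc.getD c false && recorrencias.getD c false then oc.set (c+1) true else oc).length
      = oc.length := by split <;> simp
  rcases eq_or_ne k c with rfl | hkc
  · rw [if_pos rfl, getD_set_self _ _ _ (by rw [hl]; omega)]
  · rw [getD_set_ne _ _ (Ne.symm hkc), if_neg hkc]
    rcases eq_or_ne k (c+1) with rfl | hk1
    · rw [if_pos rfl]
      split
      · next hc => rw [getD_set_self _ _ _ h, hc, Bool.true_or]
      · next hc =>
          have hc' : (oc.getD c false && recorrencias.getD c false) = false := by simpa using hc
          rw [hc', Bool.false_or]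
    · rw [if_neg hk1]
      split
      · rw [getD_set_ne _ _ (Ne.symm hk1)]
      · rfl

theorem length_bitLoopA (recorrencias : List Bool) : ∀ (oc : List Bool) (c : Nat),
    (bitLoopA recorrencias oc c).length = oc.length := by
  intro oc c
  induction c generalizing oc with
  | zero => exact length_bitStep _ _ _
  | succ c ih =>
      show (bitLoopA recorrencias (bitStep recorrencias oc (c+1)) c).length = _
      rw [ih, length_bitStep]

-- Position-by-position description of A's backward sweep (all writes in range).
theorem bitLoopA_getD (recorrencias : List Bool) : ∀ (oc : List Bool) (c : Nat),
    c + 1 < oc.length → ∀ j : Nat,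
    (bitLoopA recorrencias oc c).getD j false =
      if j = 0 then false
      else if j ≤ c then oc.getD (j-1) false && recorrencias.getD (j-1) false
      else if j = c + 1 then (oc.getD c false && recorrencias.getD c false) || oc.getD (c+1) false
      else oc.getD j false := by
  intro oc c
  induction c generalizing oc with
  | zero =>
      intro h j
      show (bitStep recorrencias oc 0).getD j false = _
      rw [bitStep_getD _ _ _ h j]
      rcases eq_or_ne j 0 with rfl | hj0
      · simp
      · rcases eq_or_ne j 1 with rfl | hj1
        · simp [hj0]
        · simp [hj0, hj1, show ¬ j ≤ 0 by omega]
  | succ c ih =>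
      intro h j
      show (bitLoopA recorrencias (bitStep recorrencias oc (c+1)) c).getD j false = _
      rw [ih _ (by rw [length_bitStep]; omega) j]
      simp only [bitStep_getD recorrencias oc (c+1) h]
      rcases eq_or_ne j 0 with rfl | hj0
      · simp
      · by_cases hjc : j ≤ c
        · simp [hj0, hjc, show j ≤ c + 1 by omega, show j - 1 ≠ c + 1 by omega,
            show j - 1 ≠ c + 1 + 1 by omega]
        · rcases eq_or_ne j (c+1) with rfl | hj1
          · simp [hj0, hjc, show c ≠ c + 1 by omega, show c ≠ c + 1 + 1 by omega,
              show c + 1 - 1 = c by omega]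
          · rcases eq_or_ne j (c+1+1) with rfl | hj2
            · simp [hj0, hjc, show ¬ c + 1 + 1 ≤ c + 1 by omega]
            · simp [hj0, hjc, hj1, hj2, show ¬ j ≤ c + 1 by omega]

theorem length_foldB (old recorrencias : List Bool) : ∀ (len a : Nat) (base : List Bool),
    ((List.range' a len).foldl
      (fun acc i => acc.set i (old.getD (i-1) false && recorrencias.getD (i-1) false)) base).length
    = base.length := by
  intro len
  induction len with
  | zero => intro a base; rfl
  | succ len ih => intro a base; rw [List.range'_succ, List.foldl_cons, ih]; simp

-- Position-by-position description of B's forward rebuild.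
theorem foldB_getD (old recorrencias : List Bool) : ∀ (len a : Nat) (base : List Bool),
    a + len ≤ base.length → ∀ j : Nat,
    ((List.range' a len).foldl
      (fun acc i => acc.set i (old.getD (i-1) false && recorrencias.getD (i-1) false)) base).getD j false =
      if a ≤ j ∧ j < a + len then old.getD (j-1) false && recorrencias.getD (j-1) false
      else base.getD j false := by
  intro len
  induction len with
  | zero =>
      intro a base _ j
      rw [show List.range' a 0 = [] from rfl, List.foldl_nil, if_neg (by omega)]
  | succ len ih =>
      intro a base h j
      rw [List.range'_succ, List.foldl_cons, ih (a+1) _ (by simp; omega) j]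
      rcases eq_or_ne j a with rfl | hja
      · rw [if_neg (by omega), getD_set_self _ _ _ (by omega), if_pos (by omega)]
      · by_cases h1 : a + 1 ≤ j ∧ j < a + 1 + len
        · rw [if_pos h1, if_pos (by omega)]
        · rw [if_neg h1, getD_set_ne _ _ (Ne.symm hja), if_neg (by omega)]

theorem bit_alt_snd_getD (oc rec : List Bool) (hn : 1 ≤ rec.length)
    (hlen : rec.length ≤ oc.length) (j : Nat) :
    (bit_alt oc rec).2.getD j false =
      if j = 0 then false
      else if j ≤ rec.length - 1 then oc.getD (j-1) false && rec.getD (j-1) false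
      else oc.getD j false := by
  have hb : (bit_alt oc rec).2 = (List.range' 1 (rec.length - 1)).foldl
      (fun acc i => acc.set i ((PySem.List.slice oc none (some ((rec.length : Nat) : Int))).getD (i-1) false
        && rec.getD (i-1) false)) (oc.set 0 false) := rfl
  rw [hb]
  simp only [PySem.List.slice_to_natCast]
  rw [foldB_getD (oc.take rec.length) rec (rec.length - 1) 1 (oc.set 0 false) (by simp; omega) j]
  rcases eq_or_ne j 0 with rfl | hj0
  · rw [if_neg (by omega), getD_set_self _ _ _ (by omega), if_pos rfl]
  · by_cases hjr : j ≤ rec.length - 1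
    · rw [if_pos (by omega), getD_take oc rec.length (j-1) (by omega), if_neg hj0, if_pos hjr]
    · rw [if_neg (by omega), getD_set_ne _ _ (Ne.symm hj0), if_neg hj0, if_neg hjr]

theorem bit_snd_getD (oc rec : List Bool) (hn : 1 ≤ rec.length)
    (hlen : rec.length ≤ oc.length) (j : Nat) :
    (bit oc rec).2.getD j false =
      if rec.length = 1 then
        (if oc.getD 0 false && rec.getD 0 false then (oc.set 0 false).getD j false else oc.getD j false)
      else
        if j = 0 then false
        else if j ≤ rec.length - 2 then oc.getD (j-1) false && rec.getD (j-1) false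
        else if j = rec.length - 1 then
          (oc.getD (rec.length - 2) false && rec.getD (rec.length - 2) false) ||
          (if oc.getD (rec.length - 1) false && rec.getD (rec.length - 1) false then false
           else oc.getD (rec.length - 1) false)
        else oc.getD j false := by
  have hb : (bit oc rec).2 = (if 2 ≤ rec.length
      then bitLoopA rec (if oc.getD (rec.length - 1) false && rec.getD (rec.length - 1) false
            then oc.set (rec.length - 1) false else oc) (rec.length - 2)
      else (if oc.getD (rec.length - 1) false && rec.getD (rec.length - 1) false
            then oc.set (rec.length - 1) false else oc)) := rfl
  rw [hb]
  rcases Nat.lt_or_ge rec.length 2 with h2 | h2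
  · have h1 : rec.length = 1 := by omega
    rw [if_neg (by omega), if_pos h1]
    simp only [h1]
    norm_num
    split <;> rfl
  · have h1 : rec.length ≠ 1 := by omega
    rw [if_pos h2, if_neg h1]
    set oc1 := (if oc.getD (rec.length - 1) false && rec.getD (rec.length - 1) false
        then oc.set (rec.length - 1) false else oc) with hoc1
    have hll : oc1.length = oc.length := by rw [hoc1]; split <;> simp
    have g1 : ∀ k : Nat, k ≠ rec.length - 1 → oc1.getD k false = oc.getD k false := by
      intro k hk
      rw [hoc1]; split
      · rw [getD_set_ne _ _ (Ne.symm hk)]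
      · rfl
    have g2 : oc1.getD (rec.length - 1) false =
        (if oc.getD (rec.length - 1) false && rec.getD (rec.length - 1) false then false
         else oc.getD (rec.length - 1) false) := by
      rw [hoc1]; split_ifs
      · rw [getD_set_self _ _ _ (by omega)]
      · rfl
    have e1 : rec.length - 2 + 1 = rec.length - 1 := by omega
    rw [bitLoopA_getD rec oc1 (rec.length - 2) (by rw [hll]; omega) j]
    rcases eq_or_ne j 0 with rfl | hj0
    · simp
    · by_cases hjc : j ≤ rec.length - 2
      · simp only [if_neg hj0, if_pos hjc, g1 (j-1) (by omega)]
      · rcases eq_or_ne j (rec.length - 1) with rfl | hj1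
        · simp only [if_neg hj0, if_neg hjc, e1, g1 (rec.length - 2) (by omega), g2]
          simp
        · simp only [if_neg hj0, if_neg hjc, e1, if_neg hj1, g1 j hj1]

theorem bit_snd_length (oc rec : List Bool) (hn : 1 ≤ rec.length)
    (hlen : rec.length ≤ oc.length) : (bit oc rec).2.length = oc.length := by
  have hb : (bit oc rec).2 = (if 2 ≤ rec.length
      then bitLoopA rec (if oc.getD (rec.length - 1) false && rec.getD (rec.length - 1) false
            then oc.set (rec.length - 1) false else oc) (rec.length - 2)
      else (if oc.getD (rec.length - 1) false && rec.getD (rec.length - 1) false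
            then oc.set (rec.length - 1) false else oc)) := rfl
  rw [hb]
  have hll : (if oc.getD (rec.length - 1) false && rec.getD (rec.length - 1) false
      then oc.set (rec.length - 1) false else oc).length = oc.length := by split <;> simp
  split
  · rw [length_bitLoopA, hll]
  · exact hll

theorem bit_alt_snd_length (oc rec : List Bool) : (bit_alt oc rec).2.length = oc.length := by
  have hb : (bit_alt oc rec).2 = (List.range' 1 (rec.length - 1)).foldl
      (fun acc i => acc.set i ((PySem.List.slice oc none (some ((rec.length : Nat) : Int))).getD (i-1) false
        && rec.getD (i-1) false)) (oc.set 0 false) := rfl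
  rw [hb, length_foldB]; simp

theorem bit_fst_eq (oc rec : List Bool) (hn : 1 ≤ rec.length)
    (hlen : rec.length ≤ oc.length) : (bit oc rec).1 = (bit_alt oc rec).1 := by
  have ha : (bit oc rec).1 = (if oc.getD (rec.length - 1) false && rec.getD (rec.length - 1) false
      then (1:Int) else 0) := rfl
  have hb : (bit_alt oc rec).1 =
      (if (PySem.List.slice oc none (some ((rec.length : Nat) : Int))).getD (rec.length - 1) false
          && rec.getD (rec.length - 1) false then (1:Int) else 0) := rfl
  rw [ha, hb]
  simp only [PySem.List.slice_to_natCast]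
  rw [getD_take oc rec.length (rec.length - 1) (by omega)]

theorem ext_getD {xs ys : List Bool} (hl : xs.length = ys.length)
    (h : ∀ j, xs.getD j false = ys.getD j false) : xs = ys := by
  apply List.ext_getElem hl
  intro j hj hj'
  have hx := h j
  rwa [List.getD_eq_getElem _ _ hj, List.getD_eq_getElem _ _ hj'] at hx

-- ===== VERDICT (by name: the statement is the Claim_ definition above) =====
theorem bit_spec : Claim_unchanged_bit := by
  intro oc rec _ hpre hnd
  obtain ⟨hne, hlen⟩ := hpre
  have hn : 1 ≤ rec.length := List.length_pos_iff.mpr hne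
  have hfst := bit_fst_eq oc rec hn hlen
  have hsnd : (bit oc rec).2 = (bit_alt oc rec).2 := by
    apply ext_getD (by rw [bit_snd_length oc rec hn hlen, bit_alt_snd_length oc rec])
    intro j
    rw [bit_snd_getD oc rec hn hlen j, bit_alt_snd_getD oc rec hn hlen j]
    rcases eq_or_ne rec.length 1 with h1 | h1
    · rw [if_pos h1]
      rcases eq_or_ne j 0 with rfl | hj0
      · have hA : (if oc.getD 0 false && rec.getD 0 false
            then (oc.set 0 false).getD 0 false else oc.getD 0 false) = false := by
          rcases Bool.eq_false_or_eq_true (oc.getD 0 false) with ho | ho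
          · have hr : rec.getD 0 false = true := by
              by_contra hc
              have hr' : rec.getD 0 false = false := by simpa using hc
              exact hnd (by
                unfold D_bit
                refine ⟨hn, hlen, ?_, ?_, Or.inl h1⟩
                · rw [h1]; exact ho
                · rw [h1]; exact hr')
            have hcond : (oc.getD 0 false && rec.getD 0 false) = true := by rw [ho, hr]; rfl
            rw [if_pos hcond, getD_set_self oc 0 false (by omega)]
          · have hcond : (oc.getD 0 false && rec.getD 0 false) = false := by
              rw [ho, Bool.false_and]
            rw [if_neg (by rw [hcond]; simp)]
            exact ho
        rw [hA, if_pos rfl]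
      · have hA : (if oc.getD 0 false && rec.getD 0 false
            then (oc.set 0 false).getD j false else oc.getD j false) = oc.getD j false := by
          split
          · rw [getD_set_ne oc false (Ne.symm hj0)]
          · rfl
        rw [hA, if_neg hj0, if_neg (show ¬ j ≤ rec.length - 1 by omega)]
    · rw [if_neg h1]
      rcases eq_or_ne j 0 with rfl | hj0
      · rw [if_pos rfl, if_pos rfl]
      · by_cases hjc : j ≤ rec.length - 2
        · simp only [if_neg hj0, if_pos hjc, if_pos (show j ≤ rec.length - 1 by omega)]
        · rcases eq_or_ne j (rec.length - 1) with rfl | hj1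
          · simp only [if_neg hj0, if_neg hjc, eq_self_iff_true, le_refl, if_true,
              show rec.length - 1 - 1 = rec.length - 2 by omega]
            rcases Bool.eq_false_or_eq_true (oc.getD (rec.length - 1) false) with ho | ho
            · rcases Bool.eq_false_or_eq_true (rec.getD (rec.length - 1) false) with hr | hr
              · have hcond : (oc.getD (rec.length - 1) false && rec.getD (rec.length - 1) false) = true := by
                  rw [ho, hr]; rfl
                rw [if_pos hcond, Bool.or_false]
              · have hmid : (oc.getD (rec.length - 2) false && rec.getD (rec.length - 2) false) = true := by
                  by_contra hc
                  have hc' : (oc.getD (rec.length - 2) false && rec.getD (rec.length - 2) false) = false := by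
                    simpa using hc
                  exact hnd (by unfold D_bit; exact ⟨hn, hlen, ho, hr, Or.inr hc'⟩)
                have hcond : (oc.getD (rec.length - 1) false && rec.getD (rec.length - 1) false) = false := by
                  rw [hr, Bool.and_false]
                rw [if_neg (by rw [hcond]; simp), hmid, Bool.true_or]
            · have hcond : (oc.getD (rec.length - 1) false && rec.getD (rec.length - 1) false) = false := by
                rw [ho, Bool.false_and]
              rw [if_neg (by rw [hcond]; simp), ho, Bool.or_false]
          · simp only [if_neg hj0, if_neg hjc, if_neg hj1,
              if_neg (show ¬ j ≤ rec.length - 1 by omega)]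
  exact Prod.ext_iff.mpr ⟨hfst, hsnd⟩

theorem bit_changed : Claim_changed_bit := by unfold Claim_changed_bit; decide

theorem bit_tight : Claim_exact_bit := by
  intro oc rec _ hpre hd heq
  obtain ⟨hne, hlen⟩ := hpre
  have hn : 1 ≤ rec.length := List.length_pos_iff.mpr hne
  obtain ⟨_, _, ho, hr, hor⟩ := hd
  have hsnd : (bit oc rec).2 = (bit_alt oc rec).2 := congrArg Prod.snd heq
  rcases eq_or_ne rec.length 1 with h1 | h1
  · have hgd := congrArg (fun l : List Bool => l.getD 0 false) hsnd
    simp only at hgd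
    rw [bit_snd_getD oc rec hn hlen 0, bit_alt_snd_getD oc rec hn hlen 0] at hgd
    rw [h1] at ho hr
    simp only [show (1:Nat) - 1 = 0 from rfl] at ho hr
    rw [if_pos h1, hr, Bool.and_false] at hgd
    simp at hgd
    simp [hgd] at ho
  · have hmid : (oc.getD (rec.length - 2) false && rec.getD (rec.length - 2) false) = false := by
      rcases hor with h | h
      · exact absurd h h1
      · exact h
    have hj0' : rec.length - 1 ≠ 0 := by omega
    have hjc' : ¬ rec.length - 1 ≤ rec.length - 2 := by omega
    have hgd := congrArg (fun l : List Bool => l.getD (rec.length - 1) false) hsnd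
    simp only at hgd
    rw [bit_snd_getD oc rec hn hlen (rec.length - 1),
      bit_alt_snd_getD oc rec hn hlen (rec.length - 1)] at hgd
    rw [if_neg h1, if_neg hj0', if_neg hjc',
      if_pos (rfl : rec.length - 1 = rec.length - 1), if_neg hj0',
      if_pos (le_refl (rec.length - 1)),
      show rec.length - 1 - 1 = rec.length - 2 by omega, hr, Bool.and_false,
      hmid, Bool.false_or, if_neg (by simp), ho] at hgd
    exact absurd hgd (by simp)
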